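-- pv_equiv track=rewrite | github.com/gyanshu/PythonProject | src/compress.py | compress_url
-- ===== SOURCE A (Python) =====
-- def compress(word: str) -> str:
--     """Compress a word by keeping the first and last character and replacing the middle with its count."""
--     if len(word) <= 2:
--         return word
--     return f"{word[0]}{len(word) - 2}{word[-1]}"
--
-- def merge(compressed1: str, compressed2: str) -> str:
--     """Merge two compressed parts into a single compressed form."""
--     num1, num2 = int(compressed1[1:-1]), int(compressed2[1:-1])
--     merged_length = num1 + num2 + 2
--     return f"{compressed1[0]}{merged_length}{compressed2[-1]}"
--
-- def process_minor_parts(segment: str, threshold: int) -> list[str]: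
--     """Process minor parts of a segment while respecting the threshold."""
--     minor_parts = [compress(part) for part in segment.split(".")]
--     while len(minor_parts) > threshold:
--         minor_parts[-2] = merge(minor_parts[-2], minor_parts[-1])
--         minor_parts.pop()
--     return minor_parts
--
-- def compress_url(url: str, threshold: int) -> str:
--     """Compress a URL while maintaining major and minor part constraints."""
--     if not isinstance(url, str) or not isinstance(threshold, int) or threshold < 1:
--         raise ValueError("URL must be a string and threshold must be a positive integer.")
--
--     major_parts = []
--     for segment in url.split("/"):
--         minor_parts = process_minor_parts(segment, threshold)
--         major_parts.append(".".join(minor_parts))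
--
--     return "/".join(major_parts)
-- ===== SOURCE B (Python) =====
-- def compress(word: str) -> str:
--     """Compress a word by keeping the first and last character and replacing the middle with its count."""
--     if len(word) <= 2:
--         return word
--     return f"{word[0]}{len(word) - 2}{word[-1]}"
--
-- def process_minor_parts(segment: str, threshold: int) -> list[str]:
--     """Closed-form: keep the first threshold-1 parts, fold the whole tail group into one token."""
--     parts = [compress(part) for part in segment.split(".")]
--     if len(parts) <= threshold:
--         return parts
--     tail = parts[threshold - 1:]
--     total = sum(int(p[1:-1]) for p in tail) + 2 * (len(tail) - 1)
--     return parts[:threshold - 1] + [f"{tail[0][0]}{total}{tail[-1][-1]}"]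
--
-- def compress_url(url: str, threshold: int) -> str:
--     if not isinstance(url, str) or not isinstance(threshold, int) or threshold < 1:
--         raise ValueError("URL must be a string and threshold must be a positive integer.")
--     return "/".join(".".join(process_minor_parts(seg, threshold)) for seg in url.split("/"))
-- ===== Notes on version B (the rewrite author's own statement) =====
-- stated objective: simpler
-- what changed: process_minor_parts replaces A's iterative merge-last-two-and-pop while loop by a closed form: keep parts[:threshold-1] and emit one token built from the first/last characters of the tail group and the sum of the tail's middle counts plus 2*(len(tail)-1).
import Mathlib
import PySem

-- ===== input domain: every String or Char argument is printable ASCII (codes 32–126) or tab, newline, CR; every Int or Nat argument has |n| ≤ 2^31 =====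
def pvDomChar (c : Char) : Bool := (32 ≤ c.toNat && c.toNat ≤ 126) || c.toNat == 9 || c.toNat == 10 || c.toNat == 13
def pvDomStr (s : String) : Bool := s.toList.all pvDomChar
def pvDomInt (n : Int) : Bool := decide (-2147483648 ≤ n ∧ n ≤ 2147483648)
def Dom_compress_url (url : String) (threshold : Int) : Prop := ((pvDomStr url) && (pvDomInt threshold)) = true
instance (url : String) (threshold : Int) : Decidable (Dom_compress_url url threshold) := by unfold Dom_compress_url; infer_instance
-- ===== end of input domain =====

-- B replaces A's iterative merge-last-two-and-pop loop by a closed-form combination of the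
-- whole tail group (sum of the middle counts plus 2*(k-1)); equivalence of return values.

-- ===== PORT A =====

-- int(s): hand-written port of Python's int() (PySem's parser is private to its module);
-- exact on the inputs it meets inside Pre_: there every parsed string is a pure digit string.
def pvInt (cs : List Char) : Option Int :=
  if cs ≠ [] ∧ cs.all Char.isDigit then
    some ((cs.foldl (fun a c => a * 10 + (c.toNat - 48)) 0 : Nat) : Int)
  else none

-- compress(word)
def pvCompress (w : List Char) : List Char :=
  if w.length ≤ 2 then w
  else [(PySem.List.pyGet? w 0).getD ' '] ++ PySem.Int.toChars ((w.length : Int) - 2) ++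
       [(PySem.List.pyGet? w (-1)).getD ' ']

-- merge(compressed1, compressed2); `.getD` totalizes where Python raises (outside Pre_)
def pvMerge (c1 c2 : List Char) : List Char :=
  let n1 := (pvInt (PySem.List.slice c1 (some 1) (some (-1)))).getD 0
  let n2 := (pvInt (PySem.List.slice c2 (some 1) (some (-1)))).getD 0
  [(PySem.List.pyGet? c1 0).getD ' '] ++ PySem.Int.toChars (n1 + n2 + 2) ++
    [(PySem.List.pyGet? c2 (-1)).getD ' ']

-- the while loop of process_minor_parts (the `2 ≤ parts.length` conjunct only totalizes the
-- state where Python hits an IndexError, outside Pre_)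
def pvLoopA (parts : List (List Char)) (t : Int) : List (List Char) :=
  if _h : t < (parts.length : Int) ∧ 2 ≤ parts.length then
    pvLoopA (parts.dropLast.dropLast ++
      [pvMerge ((PySem.List.pyGet? parts (-2)).getD []) ((PySem.List.pyGet? parts (-1)).getD [])]) t
  else parts
termination_by parts.length
decreasing_by
  simp only [List.length_append, List.length_dropLast, List.length_cons, List.length_nil]
  omega

def pvProcessA (seg : List Char) (t : Int) : List (List Char) :=
  pvLoopA ((PySem.Chars.splitOn seg ['.']).map pvCompress) t

def compress_url (url : String) (threshold : Int) : String :=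
  if threshold < 1 then "" else  -- Python raises ValueError here (outside Pre_)
  String.ofList (PySem.Chars.join ['/']
    ((PySem.Chars.splitOn url.toList ['/']).foldl
      (fun acc seg => acc ++ [PySem.Chars.join ['.'] (pvProcessA seg threshold)]) []))

-- ===== PORT B =====

-- closed-form process_minor_parts of Source B
def pvProcessB (seg : List Char) (t : Int) : List (List Char) :=
  let parts := (PySem.Chars.splitOn seg ['.']).map pvCompress
  if (parts.length : Int) ≤ t then parts
  else
    let tail := PySem.List.slice parts (some (t - 1)) none
    let total := (tail.map (fun p =>
        (pvInt (PySem.List.slice p (some 1) (some (-1)))).getD 0)).sum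
      + 2 * ((tail.length : Int) - 1)
    PySem.List.slice parts none (some (t - 1)) ++
      [[(PySem.List.pyGet? ((PySem.List.pyGet? tail 0).getD []) 0).getD ' '] ++
        PySem.Int.toChars total ++
        [(PySem.List.pyGet? ((PySem.List.pyGet? tail (-1)).getD []) (-1)).getD ' ']]

def compress_url_alt (url : String) (threshold : Int) : String :=
  if threshold < 1 then "" else  -- Source B raises ValueError here too (outside Pre_)
  String.ofList (PySem.Chars.join ['/']
    ((PySem.Chars.splitOn url.toList ['/']).map
      (fun seg => PySem.Chars.join ['.'] (pvProcessB seg threshold))))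

-- ===== PRECONDITION & SPEC =====

-- Pre_ excludes exactly the inputs on which A raises (and B raises alike): threshold < 1
-- (explicit ValueError), and segments with more dot-parts than the threshold in which some
-- merged tail part has length ≤ 2, where int(part[1:-1]) raises ValueError.
def Pre_compress_url (url : String) (threshold : Int) : Prop :=
  1 ≤ threshold ∧ ∀ seg ∈ PySem.Chars.splitOn url.toList ['/'],
    (((PySem.Chars.splitOn seg ['.']).length : Int) ≤ threshold ∨
      ∀ p ∈ (PySem.Chars.splitOn seg ['.']).drop (threshold - 1).toNat, 3 ≤ p.length)

instance (url : String) (threshold : Int) : Decidable (Pre_compress_url url threshold) := by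
  unfold Pre_compress_url; infer_instance

def pvWitness_compress_url : String × Int := ("ab/cde.fghi.jklm", 2)

def Spec_compress_url (url : String) (threshold : Int) (out : String) : Prop :=
  out = compress_url_alt url threshold
instance (url : String) (threshold : Int) (out : String) : Decidable (Spec_compress_url url threshold out) := by
  unfold Spec_compress_url; infer_instance

-- ===== CLAIM (what is proved, stated in full; the proofs are below) =====
def Claim_equal_compress_url : Prop := ∀ (url : String) (threshold : Int), Dom_compress_url url threshold → Pre_compress_url url threshold → Spec_compress_url url threshold (compress_url url threshold)

-- ===== LEMMAS AND PROOFS =====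

-- a compressed part: first char, middle count, last char
def pvMk (a : Char) (m : Int) (b : Char) : List Char :=
  a :: (PySem.Int.toChars m ++ [b])

def pvMkT (x : Char × Int × Char) : List Char := pvMk x.1 x.2.1 x.2.2

def pvCombT (ts : List (Char × Int × Char)) : Char × Int × Char :=
  ((ts.headD (' ', 0, ' ')).1,
   (ts.map (fun x => x.2.1)).sum + 2 * ((ts.length : Int) - 1),
   (ts.getLastD (' ', 0, ' ')).2.2)

def pvTriple (w : List Char) : Char × Int × Char :=
  (w.headD ' ', (w.length : Int) - 2, w.getLastD ' ')

theorem pv_digitChar (r : Nat) (h : r < 10) : (Nat.digitChar r).toNat = 48 + r := by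
  interval_cases r <;> decide

theorem pv_foldl_toDigits (n : Nat) : ∀ acc : Nat,
    (Nat.toDigits 10 n).foldl (fun a c => a * 10 + (c.toNat - 48)) acc
      = acc * 10 ^ (Nat.toDigits 10 n).length + n := by
  induction n using Nat.strong_induction_on with
  | _ n ih =>
    intro acc
    rw [Nat.toDigits_eq_if (by norm_num)]
    by_cases h : n < 10
    · simp [h, pv_digitChar n h]
    · rw [if_neg h]
      rw [List.foldl_append, ih (n / 10) (by omega) acc]
      simp only [List.foldl_cons, List.foldl_nil, List.length_append, List.length_cons,
        List.length_nil, pv_digitChar (n % 10) (by omega)]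
      have h48 : 48 + n % 10 - 48 = n % 10 := by omega
      rw [h48, pow_succ]
      have := Nat.div_add_mod n 10
      ring_nf
      omega

theorem pvInt_toChars (m : Int) (hm : 0 ≤ m) :
    pvInt (PySem.Int.toChars m) = some m := by
  have htc : PySem.Int.toChars m = Nat.toDigits 10 m.toNat := by
    unfold PySem.Int.toChars; rw [if_neg (by omega)]
  rw [htc]
  unfold pvInt
  rw [if_pos]
  · rw [pv_foldl_toDigits]
    simp [Int.toNat_of_nonneg hm]
  · constructor
    · have := Nat.length_toDigits_pos (b := 10) (n := m.toNat)
      intro hc; rw [hc] at this; simp at this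
    · rw [List.all_eq_true]
      intro c hc
      exact Nat.isDigit_of_mem_toDigits (by norm_num) (by norm_num) hc

theorem pv_slice_mid (a b : Char) (ys : List Char) :
    PySem.List.slice (a :: (ys ++ [b])) (some 1) (some (-1)) = ys := by
  simp [PySem.List.slice, PySem.List.clampIdx]
  rw [if_neg (by omega)]
  have htake := List.take_left (l₁ := ys) (l₂ := [b])
  simp at htake
  simp [htake]

theorem pv_get_zero {α : Type} (a : α) (l : List α) :
    PySem.List.pyGet? (a :: l) 0 = some a := by
  simp [PySem.List.pyGet?, PySem.List.pyIdx?]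

theorem pv_get_last {α : Type} (l : List α) (u : α) :
    PySem.List.pyGet? (l ++ [u]) (-1) = some u := by
  simp [PySem.List.pyGet?, PySem.List.pyIdx?]

theorem pv_get_prelast {α : Type} (l : List α) (u v : α) :
    PySem.List.pyGet? (l ++ [u, v]) (-2) = some u := by
  simp [PySem.List.pyGet?, PySem.List.pyIdx?]

theorem pv_get_neg_one {α : Type} (w : List α) (hne : w ≠ []) (d : α) :
    (PySem.List.pyGet? w (-1)).getD d = w.getLastD d := by
  obtain ⟨l, u, rfl⟩ := (w.eq_nil_or_concat).resolve_left hne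
  rw [List.concat_eq_append, pv_get_last]
  simp

theorem pvMerge_mk (a b c d : Char) (m n : Int) (hm : 0 ≤ m) (hn : 0 ≤ n) :
    pvMerge (pvMk a m b) (pvMk c n d) = pvMk a (m + n + 2) d := by
  unfold pvMerge pvMk
  rw [pv_slice_mid, pv_slice_mid, pvInt_toChars m hm, pvInt_toChars n hn, pv_get_zero]
  rw [show c :: (PySem.Int.toChars n ++ [d]) = (c :: PySem.Int.toChars n) ++ [d] by simp]
  rw [pv_get_last]
  simp

theorem pvCompress_long (w : List Char) (hw : 3 ≤ w.length) :
    pvCompress w = pvMk (w.headD ' ') ((w.length : Int) - 2) (w.getLastD ' ') := by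
  unfold pvCompress pvMk
  rw [if_neg (by omega)]
  have hne : w ≠ [] := by intro h; rw [h] at hw; simp at hw
  rw [pv_get_neg_one w hne]
  obtain ⟨a, l, rfl⟩ : ∃ a l, w = a :: l := by
    cases w with
    | nil => simp at hw
    | cons a l => exact ⟨a, l, rfl⟩
  rw [pv_get_zero]
  simp

theorem pvLoopA_closed (N : Nat) : ∀ (ts : List (Char × Int × Char)) (front : List (List Char)) (t : Int),
    ts.length = N → 2 ≤ N → (front.length : Int) = t - 1 → (∀ x ∈ ts, 0 ≤ x.2.1) →
    pvLoopA (front ++ ts.map pvMkT) t = front ++ [pvMkT (pvCombT ts)] := by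
  induction N using Nat.strong_induction_on with
  | _ N ih =>
    intro ts front t hlen h2 hfront hnn
    obtain ⟨ds', y, rfl⟩ := (ts.eq_nil_or_concat).resolve_left (by
      intro h; rw [h] at hlen; simp at hlen; omega)
    obtain ⟨ds, x, rfl⟩ := (ds'.eq_nil_or_concat).resolve_left (by
      intro h; rw [h] at hlen; simp at hlen; omega)
    simp only [List.concat_eq_append, List.append_assoc, List.singleton_append] at *
    have hdsl : ds.length + 2 = N := by simpa using hlen
    have hL : (front ++ List.map pvMkT (ds ++ [x, y])).length = front.length + (ds.length + 2) := by
      simp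
    rw [pvLoopA]
    rw [dif_pos (by rw [hL]; exact ⟨by push_cast; omega, by omega⟩)]
    have hmapsplit : front ++ List.map pvMkT (ds ++ [x, y])
        = (front ++ List.map pvMkT ds ++ [pvMkT x]) ++ [pvMkT y] := by
      simp [List.map_append]
    have hdl2 : (front ++ List.map pvMkT (ds ++ [x, y])).dropLast.dropLast
        = front ++ List.map pvMkT ds := by
      rw [hmapsplit, List.dropLast_concat, List.dropLast_concat]
    have hgl : (PySem.List.pyGet? (front ++ List.map pvMkT (ds ++ [x, y])) (-1)).getD [] = pvMkT y := by
      rw [hmapsplit, pv_get_last]; rfl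
    have hgp : (PySem.List.pyGet? (front ++ List.map pvMkT (ds ++ [x, y])) (-2)).getD [] = pvMkT x := by
      have hsh : front ++ List.map pvMkT (ds ++ [x, y])
          = (front ++ List.map pvMkT ds) ++ [pvMkT x, pvMkT y] := by simp [List.map_append]
      rw [hsh, pv_get_prelast]; rfl
    rw [hdl2, hgl, hgp]
    have hmerge : pvMerge (pvMkT x) (pvMkT y) = pvMkT (x.1, x.2.1 + y.2.1 + 2, y.2.2) := by
      have hx : 0 ≤ x.2.1 := hnn x (by simp)
      have hy : 0 ≤ y.2.1 := hnn y (by simp)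
      exact pvMerge_mk x.1 x.2.2 y.1 y.2.2 x.2.1 y.2.1 hx hy
    rw [hmerge]
    set z : Char × Int × Char := (x.1, x.2.1 + y.2.1 + 2, y.2.2) with hz
    have hts' : front ++ List.map pvMkT ds ++ [pvMkT z] = front ++ List.map pvMkT (ds ++ [z]) := by
      simp [List.map_append]
    rw [hts']
    by_cases hN2 : N = 2
    · have hds : ds = [] := by
        have : ds.length = 0 := by omega
        exact List.eq_nil_of_length_eq_zero this
      subst hds
      rw [pvLoopA, dif_neg (by
        simp only [List.map_cons, List.map_nil, List.nil_append, List.length_append,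
          List.length_cons, List.length_nil]
        push_cast
        omega)]
      simp [pvCombT, hz]
    · have hlen' : (ds ++ [z]).length = N - 1 := by
        simp only [List.length_append, List.length_cons, List.length_nil]; omega
      rw [ih (N-1) (by omega) (ds ++ [z]) front t hlen' (by omega) hfront (by
        intro w hw
        rcases List.mem_append.mp hw with h | h
        · exact hnn w (by simp [h])
        · simp at h; subst h
          have hx : 0 ≤ x.2.1 := hnn x (by simp)
          have hy : 0 ≤ y.2.1 := hnn y (by simp)
          simp [hz]; omega)]
      have hcomb : pvCombT (ds ++ [z]) = pvCombT (ds ++ [x, y]) := by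
        obtain ⟨d0, ds0, rfl⟩ : ∃ d0 ds0, ds = d0 :: ds0 := by
          cases ds with
          | nil => simp at hdsl; omega
          | cons d0 ds0 => exact ⟨d0, ds0, rfl⟩
        unfold pvCombT
        refine Prod.ext ?_ (Prod.ext ?_ ?_)
        · simp
        · simp [hz]
          try push_cast
          try ring
        · simp only [List.cons_append]
          rw [show (d0 :: (ds0 ++ [z])) = (d0 :: ds0) ++ [z] by simp,
              show (d0 :: (ds0 ++ [x, y])) = ((d0 :: ds0) ++ [x]) ++ [y] by simp,
              List.getLastD_concat, List.getLastD_concat]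
          try simp [hz]
      rw [hcomb]

theorem pvProcess_eq (seg : List Char) (t : Int) (ht : 1 ≤ t)
    (hseg : ((PySem.Chars.splitOn seg ['.']).length : Int) ≤ t ∨
      ∀ p ∈ (PySem.Chars.splitOn seg ['.']).drop (t - 1).toNat, 3 ≤ p.length) :
    pvProcessA seg t = pvProcessB seg t := by
  unfold pvProcessA pvProcessB
  set ps := PySem.Chars.splitOn seg ['.'] with hps
  set parts := ps.map pvCompress with hparts
  have hplen : parts.length = ps.length := by simp [hparts]
  by_cases hle : (parts.length : Int) ≤ t
  · rw [if_pos hle, pvLoopA, dif_neg (by omega)]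
  · rw [if_neg hle]
    have hgt : t < (ps.length : Int) := by rw [hplen] at hle; omega
    have hwords : ∀ p ∈ ps.drop (t - 1).toNat, 3 ≤ p.length := by
      rcases hseg with h | h
      · exact absurd (by rw [hplen]; exact h) hle
      · exact h
    set n1 : Nat := (t - 1).toNat with hn1
    have hn1i : (n1 : Int) = t - 1 := by omega
    have hn1lt : n1 < ps.length := by omega
    set ts : List (Char × Int × Char) := (ps.drop n1).map pvTriple with hts
    set front : List (List Char) := parts.take n1 with hfront
    have htail : parts.drop n1 = ts.map pvMkT := by
      rw [hparts, ← List.map_drop, hts, List.map_map]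
      refine List.map_congr_left ?_
      intro w hw
      have h3 : 3 ≤ w.length := hwords w hw
      simp [Function.comp, pvCompress_long w h3, pvTriple, pvMkT]
    have hsplit : parts = front ++ ts.map pvMkT := by
      rw [hfront, ← htail, List.take_append_drop]
    have hfrontlen : (front.length : Int) = t - 1 := by
      rw [hfront, List.length_take, hplen]
      have hmin : min n1 ps.length = n1 := by omega
      rw [hmin, hn1i]
    have htslen : 2 ≤ ts.length := by
      rw [hts, List.length_map, List.length_drop]
      omega
    have hnn : ∀ x ∈ ts, 0 ≤ x.2.1 := by
      intro x hx
      rw [hts] at hx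
      obtain ⟨w, hw, rfl⟩ := List.mem_map.mp hx
      have := hwords w hw
      simp [pvTriple]
      omega
    clear_value ts front
    rw [hsplit, pvLoopA_closed ts.length ts front t rfl htslen hfrontlen hnn]
    rw [PySem.List.slice_from _ (by omega : (0:Int) ≤ t - 1),
        PySem.List.slice_to _ (by omega : (0:Int) ≤ t - 1)]
    rw [show (t-1).toNat = n1 from rfl]
    rw [show (front ++ List.map pvMkT ts).drop n1 = List.map pvMkT ts from by
      rw [← hsplit, ← htail]]
    rw [show (front ++ List.map pvMkT ts).take n1 = front from by
      rw [← hsplit, hfront]]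
    congr 1
    have hsum : (List.map (fun p => (pvInt (PySem.List.slice p (some 1) (some (-1)))).getD 0)
        (List.map pvMkT ts)).sum = (ts.map (fun x => x.2.1)).sum := by
      rw [List.map_map]
      congr 1
      refine List.map_congr_left ?_
      intro x hx
      have hm : 0 ≤ x.2.1 := hnn x hx
      simp [Function.comp, pvMkT, pvMk, pv_slice_mid, pvInt_toChars _ hm]
    obtain ⟨h0, ts', rfl⟩ : ∃ h0 ts', ts = h0 :: ts' := by
      cases ts with
      | nil => simp at htslen
      | cons h0 ts' => exact ⟨h0, ts', rfl⟩
    obtain ⟨ds, la, hconcat⟩ : ∃ ds la, h0 :: ts' = ds ++ [la] := by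
      obtain ⟨ds, la, h⟩ := ((h0 :: ts').eq_nil_or_concat).resolve_left (by simp)
      exact ⟨ds, la, by simpa using h⟩
    have hget0 : (PySem.List.pyGet? (List.map pvMkT (h0 :: ts')) 0).getD [] = pvMkT h0 := by
      rw [List.map_cons, pv_get_zero]
      rfl
    have hgetl : (PySem.List.pyGet? (List.map pvMkT (h0 :: ts')) (-1)).getD [] = pvMkT la := by
      rw [hconcat, List.map_append]
      simp only [List.map_cons, List.map_nil]
      rw [pv_get_last]
      rfl
    rw [hget0, hgetl, hsum]
    have hlen2 : (List.map pvMkT (h0 :: ts')).length = (h0 :: ts').length := by simp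
    rw [hlen2]
    have hc1 : (PySem.List.pyGet? (pvMkT h0) 0).getD ' ' = h0.1 := by
      simp [pvMkT, pvMk]
    have hc2 : (PySem.List.pyGet? (pvMkT la) (-1)).getD ' ' = la.2.2 := by
      rw [show pvMkT la = (la.1 :: PySem.Int.toChars la.2.1) ++ [la.2.2] from by simp [pvMkT, pvMk]]
      rw [pv_get_last]
      rfl
    rw [hc1, hc2]
    have hgl2 : ((h0 :: ts').getLastD (' ', 0, ' ')) = la := by
      rw [hconcat]; exact List.getLastD_concat
    unfold pvCombT pvMkT pvMk
    simp only [List.headD_cons, hgl2]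
    simp

-- ===== VERDICT (by name: the statement is the Claim_ definition above) =====
theorem compress_url_spec : Claim_equal_compress_url := by
  intro url t _ hpre
  unfold Spec_compress_url compress_url compress_url_alt
  obtain ⟨ht, hsegs⟩ := hpre
  have hlt : ¬ t < 1 := by omega
  simp only [hlt, if_false]
  rw [PySem.List.foldl_append_singleton_eq_map]
  simp only [List.nil_append]
  congr 1
  congr 1
  exact List.map_congr_left (fun seg hs => by rw [pvProcess_eq seg t ht (hsegs seg hs)])
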